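-- pv_equiv track=rewrite | github.com/Scartiloffista/aoc | 2022/15.2.py | get_grid
-- ===== SOURCE A (Python) =====
-- def get_grid(sensors, beacons, occupied):
--
--     grid = []
--
--     max_x = max(x[0] for x in sensors.union(beacons, occupied))
--     max_y = max(x[1] for x in sensors.union(beacons, occupied))
--     min_x = min(x[0] for x in sensors.union(beacons, occupied))
--     min_y = min(x[1] for x in sensors.union(beacons, occupied))
--
--
--     for y in range(min_y, max_y+1):
--         row = []
--         for x in range(min_x, max_x+1):
--             if (x,y) in sensors:
--                 row.append('S')
--             elif (x,y) in beacons: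
--                 row.append('B')
--             elif (x,y) in occupied:
--                 row.append('#')
--             else:
--                 row.append('.')
--
--         id = format(y, '03d')
--
--         grid.append([id] + [" "] +row)
--
--     grid = ["".join(x) for x in grid]
--     return "\n".join(grid)
-- ===== SOURCE B (Python) =====
-- def get_grid(sensors, beacons, occupied):
--     pts = sensors.union(beacons, occupied)
--     max_x = max(p[0] for p in pts)
--     max_y = max(p[1] for p in pts)
--     min_x = min(p[0] for p in pts)
--     min_y = min(p[1] for p in pts)
--
--     w = max_x - min_x + 1
--     grid = [['.'] * w for _ in range(min_y, max_y + 1)]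
--     # stamp in reverse priority order: later writes win, so S > B > #
--     for mark, group in (('#', occupied), ('B', beacons), ('S', sensors)):
--         for (x, y) in group:
--             grid[y - min_y][x - min_x] = mark
--     return "\n".join(format(y, '03d') + " " + "".join(row)
--                      for y, row in enumerate(grid, min_y))
-- ===== Notes on version B (the rewrite author's own statement) =====
-- stated objective: faster
-- what changed: Instead of testing membership of every grid cell against the three sets (an if/elif chain per cell), B allocates a '.'-filled grid once and scatters the points onto it in reverse priority order (occupied '#', then beacons 'B', then sensors 'S'), so the per-cell membership tests disappear.
import Mathlib
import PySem

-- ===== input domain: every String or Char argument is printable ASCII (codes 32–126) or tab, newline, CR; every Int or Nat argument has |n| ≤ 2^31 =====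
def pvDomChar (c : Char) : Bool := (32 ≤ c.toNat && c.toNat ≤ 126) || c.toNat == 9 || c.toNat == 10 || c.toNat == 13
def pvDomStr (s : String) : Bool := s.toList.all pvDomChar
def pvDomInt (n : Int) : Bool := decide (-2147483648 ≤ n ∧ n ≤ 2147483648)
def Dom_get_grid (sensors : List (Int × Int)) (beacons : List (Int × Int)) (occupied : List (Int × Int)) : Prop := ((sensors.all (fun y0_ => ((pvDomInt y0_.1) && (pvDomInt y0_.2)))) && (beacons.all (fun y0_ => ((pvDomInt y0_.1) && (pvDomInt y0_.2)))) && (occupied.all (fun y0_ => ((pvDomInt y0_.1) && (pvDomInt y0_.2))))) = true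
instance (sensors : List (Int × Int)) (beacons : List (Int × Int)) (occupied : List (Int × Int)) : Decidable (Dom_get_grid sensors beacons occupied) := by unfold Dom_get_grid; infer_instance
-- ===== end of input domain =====

-- B replaces A's per-cell membership chain by a '.'-filled grid stamped in reverse priority order ('#','B','S'); same return value, alternative decomposition.

-- ===== PORT A =====
-- format(y, '03d'): sign, then digits zero-padded to total width 3 (exact port of Python's format)
def fmt03 (y : Int) : List Char :=
  let ds := PySem.Int.toChars (if y < 0 then -y else y)
  let sign : List Char := if y < 0 then ['-'] else []
  let width : Nat := if y < 0 then 2 else 3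
  sign ++ List.replicate (width - ds.length) '0' ++ ds

-- sensors.union(beacons, occupied)
def pyUnion3 (s b o : List (Int × Int)) : PySem.Set (Int × Int) :=
  PySem.Set.update (PySem.Set.update (PySem.Set.ofList s) b) o

def get_grid (sensors : List (Int × Int)) (beacons : List (Int × Int)) (occupied : List (Int × Int)) : String :=
  let u := pyUnion3 sensors beacons occupied
  let max_x := (PySem.List.max? (u.map (fun p => p.1)) (fun v => v)).getD 0
  let max_y := (PySem.List.max? (u.map (fun p => p.2)) (fun v => v)).getD 0
  let min_x := (PySem.List.min? (u.map (fun p => p.1)) (fun v => v)).getD 0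
  let min_y := (PySem.List.min? (u.map (fun p => p.2)) (fun v => v)).getD 0
  let grid := (PySem.List.pyRange min_y (max_y + 1) 1).map (fun y =>
    let row := (PySem.List.pyRange min_x (max_x + 1) 1).map (fun x =>
      if (x, y) ∈ sensors then 'S'
      else if (x, y) ∈ beacons then 'B'
      else if (x, y) ∈ occupied then '#'
      else '.')
    String.mk (fmt03 y ++ [' '] ++ row))
  PySem.Str.join "\n" grid

-- ===== PORT B =====
-- grid[y - min_y][x - min_x] = mark
def stampPt (min_x min_y : Int) (c : Char) (g : List (List Char)) (p : Int × Int) : List (List Char) :=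
  g.modify (p.2 - min_y).toNat (fun row => row.set (p.1 - min_x).toNat c)

def get_grid_alt (sensors : List (Int × Int)) (beacons : List (Int × Int)) (occupied : List (Int × Int)) : String :=
  let pts := pyUnion3 sensors beacons occupied
  let max_x := (PySem.List.max? (pts.map (fun p => p.1)) (fun v => v)).getD 0
  let max_y := (PySem.List.max? (pts.map (fun p => p.2)) (fun v => v)).getD 0
  let min_x := (PySem.List.min? (pts.map (fun p => p.1)) (fun v => v)).getD 0
  let min_y := (PySem.List.min? (pts.map (fun p => p.2)) (fun v => v)).getD 0
  let w := (max_x - min_x + 1).toNat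
  let grid0 := List.replicate (max_y + 1 - min_y).toNat (List.replicate w '.')
  let g1 := occupied.foldl (stampPt min_x min_y '#') grid0
  let g2 := beacons.foldl (stampPt min_x min_y 'B') g1
  let g3 := sensors.foldl (stampPt min_x min_y 'S') g2
  PySem.Str.join "\n"
    ((PySem.List.enumerate g3 min_y).map (fun yr => String.mk (fmt03 yr.1 ++ [' '] ++ yr.2)))

-- ===== PRECONDITION & SPEC =====
-- Pre_ excludes only the empty union (all three sets empty), on which A's max() raises ValueError.
def Pre_get_grid (sensors : List (Int × Int)) (beacons : List (Int × Int)) (occupied : List (Int × Int)) : Prop :=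
  sensors ≠ [] ∨ beacons ≠ [] ∨ occupied ≠ []
instance (sensors : List (Int × Int)) (beacons : List (Int × Int)) (occupied : List (Int × Int)) : Decidable (Pre_get_grid sensors beacons occupied) := by unfold Pre_get_grid; infer_instance

def pvWitness_get_grid : (List (Int × Int)) × (List (Int × Int)) × (List (Int × Int)) :=
  ([(0, 0), (2, 1)], [(1, 0)], [(0, 1)])

def Spec_get_grid (sensors : List (Int × Int)) (beacons : List (Int × Int)) (occupied : List (Int × Int)) (out : String) : Prop := out = get_grid_alt sensors beacons occupied
instance (sensors : List (Int × Int)) (beacons : List (Int × Int)) (occupied : List (Int × Int)) (out : String) : Decidable (Spec_get_grid sensors beacons occupied out) := by unfold Spec_get_grid; infer_instance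

-- ===== CLAIM (what is proved, stated in full; the proofs are below) =====
def Claim_equal_get_grid : Prop := ∀ (sensors : List (Int × Int)) (beacons : List (Int × Int)) (occupied : List (Int × Int)), Dom_get_grid sensors beacons occupied → Pre_get_grid sensors beacons occupied → Spec_get_grid sensors beacons occupied (get_grid sensors beacons occupied)


-- ===== LEMMAS AND PROOFS =====

-- cell access with Python-style defaults (proof-only helper)
def pvCell (g : List (List Char)) (i j : Nat) : Char := (g.getD i []).getD j '.'

theorem pvStamp_length (mx my : Int) (c : Char) (g : List (List Char)) (p : Int × Int) :
    (stampPt mx my c g p).length = g.length := by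
  simp [stampPt]

theorem pvFoldl_stamp_length (mx my : Int) (c : Char) (L : List (Int × Int)) :
    ∀ g : List (List Char), (L.foldl (stampPt mx my c) g).length = g.length := by
  induction L with
  | nil => intro g; rfl
  | cons a t ih => intro g; simp only [List.foldl_cons]; rw [ih, pvStamp_length]

theorem pvRows_stamp (mx my : Int) (W : Nat) (c : Char) (g : List (List Char)) (p : Int × Int)
    (h : ∀ r ∈ g, r.length = W) : ∀ r ∈ stampPt mx my c g p, r.length = W := by
  intro r hr
  obtain ⟨k, hk, rfl⟩ := List.getElem_of_mem hr
  have hk' : k < g.length := by simpa [stampPt] using hk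
  have h1 := List.getElem?_modify (fun row => row.set (p.1 - mx).toNat c) (p.2 - my).toNat g k
  rw [show g.modify (p.2 - my).toNat (fun row => row.set (p.1 - mx).toNat c) =
        stampPt mx my c g p from rfl,
      List.getElem?_eq_getElem hk, List.getElem?_eq_getElem hk'] at h1
  simp only [Option.map_eq_map, Option.map_some, Option.some.injEq] at h1
  rw [h1]
  split
  · rw [List.length_set]; exact h _ (List.getElem_mem hk')
  · exact h _ (List.getElem_mem hk')

theorem pvFoldl_rows (mx my : Int) (W : Nat) (c : Char) (L : List (Int × Int)) :
    ∀ g : List (List Char), (∀ r ∈ g, r.length = W) →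
      ∀ r ∈ L.foldl (stampPt mx my c) g, r.length = W := by
  induction L with
  | nil => intro g h; exact h
  | cons a t ih =>
    intro g h
    exact ih _ (pvRows_stamp mx my W c g a h)

theorem pvCell_stamp (mx my : Int) (W : Nat) (c : Char) (g : List (List Char)) (p : Int × Int)
    (hrow : ∀ r ∈ g, r.length = W)
    (hp : 0 ≤ p.1 - mx ∧ (p.1 - mx).toNat < W ∧ 0 ≤ p.2 - my ∧ (p.2 - my).toNat < g.length)
    (i j : Nat) (hj : j < W) :
    pvCell (stampPt mx my c g p) i j =
      if p = (mx + (j : Int), my + (i : Int)) then c else pvCell g i j := by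
  obtain ⟨h1, h2, h3, h4⟩ := hp
  unfold pvCell stampPt
  rw [List.getD_eq_getElem?_getD, List.getD_eq_getElem?_getD, List.getElem?_modify]
  by_cases hpt : p = (mx + (j : Int), my + (i : Int))
  · subst hpt
    simp only at h1 h2 h3 h4
    have hi : ((mx + (j : Int), my + (i : Int)).2 - my).toNat = i := by simp
    have hc : ((mx + (j : Int), my + (i : Int)).1 - mx).toNat = j := by simp
    have hilen : i < g.length := by omega
    rw [List.getElem?_eq_getElem hilen]
    simp only [Option.map_eq_map, Option.map_some, Option.getD_some, if_pos hi, hc]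
    rw [List.getElem?_set]
    simp [hrow _ (List.getElem_mem hilen), hj]
  · rw [if_neg hpt]
    by_cases hi : (p.2 - my).toNat = i
    · have hc : (p.1 - mx).toNat ≠ j := by
        intro hc
        apply hpt
        have e1 : p.1 = mx + (j : Int) := by omega
        have e2 : p.2 = my + (i : Int) := by omega
        exact Prod.ext e1 e2
      have hilen : i < g.length := hi ▸ h4
      rw [List.getElem?_eq_getElem hilen]
      simp only [Option.map_eq_map, Option.map_some, Option.getD_some]
      rw [if_pos hi, List.getD_eq_getElem?_getD, List.getD_eq_getElem?_getD,
          List.getElem?_set, if_neg hc]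
      simp [List.getElem?_eq_getElem hilen]
    · cases hgi : g[i]? with
      | none => simp [hgi]
      | some row =>
        simp only [hgi, Option.map_eq_map, Option.map_some, Option.getD_some]
        rw [if_neg hi]
        simp [List.getD_eq_getElem?_getD, hgi]

theorem pvCell_foldl (mx my : Int) (W : Nat) (c : Char) (L : List (Int × Int)) :
    ∀ g : List (List Char), (∀ r ∈ g, r.length = W) →
      (∀ p ∈ L, 0 ≤ p.1 - mx ∧ (p.1 - mx).toNat < W ∧ 0 ≤ p.2 - my ∧ (p.2 - my).toNat < g.length) →
      ∀ i j : Nat, j < W →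
        pvCell (L.foldl (stampPt mx my c) g) i j =
          if (mx + (j : Int), my + (i : Int)) ∈ L then c else pvCell g i j := by
  induction L with
  | nil => intro g _ _ i j _; simp
  | cons a t ih =>
    intro g hrow hb i j hj
    simp only [List.foldl_cons]
    have hrow' := pvRows_stamp mx my W c g a hrow
    have hb' : ∀ p ∈ t, 0 ≤ p.1 - mx ∧ (p.1 - mx).toNat < W ∧ 0 ≤ p.2 - my ∧
        (p.2 - my).toNat < (stampPt mx my c g a).length := by
      intro p hp
      have := hb p (List.mem_cons_of_mem _ hp)
      rw [pvStamp_length]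
      exact this
    rw [ih _ hrow' hb' i j hj,
        pvCell_stamp mx my W c g a hrow (hb a List.mem_cons_self) i j hj]
    by_cases hm : (mx + (j : Int), my + (i : Int)) ∈ t
    · simp [hm]
    · by_cases ha : a = (mx + (j : Int), my + (i : Int)) <;> simp [hm, ha, List.mem_cons] <;> tauto

theorem pvCell_replicate (H W : Nat) (i j : Nat) :
    pvCell (List.replicate H (List.replicate W '.')) i j = '.' := by
  simp only [pvCell, List.getD_eq_getElem?_getD, List.getElem?_replicate]
  by_cases hi : i < H <;> by_cases hj : j < W <;> simp [hi, hj]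

theorem pvRow_eq_map (g : List (List Char)) (W i : Nat)
    (hrow : ∀ r ∈ g, r.length = W) (hi : i < g.length) :
    g[i] = (List.range W).map (fun j => pvCell g i j) := by
  apply List.ext_getElem
  · simp [hrow g[i] (List.getElem_mem hi)]
  · intro j h1 h2
    simp only [List.getElem_map, List.getElem_range, pvCell]
    rw [List.getD_eq_getElem?_getD (l := g), List.getElem?_eq_getElem hi, Option.getD_some,
        List.getD_eq_getElem?_getD, List.getElem?_eq_getElem h1, Option.getD_some]

theorem pvEnumerate_getElem? {α : Type} : ∀ (xs : List α) (s : Int) (i : Nat),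
    (PySem.List.enumerate xs s)[i]? = xs[i]?.map (fun a => (s + (i : Int), a)) := by
  intro xs
  induction xs with
  | nil => intro s i; simp [PySem.List.enumerate]
  | cons x t ih =>
    intro s i
    cases i with
    | zero => simp [PySem.List.enumerate]
    | succ n =>
      simp only [PySem.List.enumerate, List.getElem?_cons_succ]
      rw [ih]
      cases t[n]? <;> simp <;> push_cast <;> ring_nf


-- ===== VERDICT (by name: the statement is the Claim_ definition above) =====
theorem get_grid_spec : Claim_equal_get_grid := by
  intro sensors beacons occupied _ hpre
  unfold Spec_get_grid get_grid get_grid_alt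
  simp only []
  -- shared extrema
  set u := pyUnion3 sensors beacons occupied with hu_def
  have hmem_u : ∀ p : Int × Int, p ∈ u ↔ p ∈ sensors ∨ p ∈ beacons ∨ p ∈ occupied := by
    intro p
    simp only [hu_def, pyUnion3, PySem.Set.mem_update, PySem.Set.mem_ofList]
    tauto
  have hu_ne : u ≠ [] := by
    unfold Pre_get_grid at hpre
    have hex : ∃ p : Int × Int, p ∈ sensors ∨ p ∈ beacons ∨ p ∈ occupied := by
      rcases hpre with h | h | h
      · obtain ⟨p, hp⟩ := List.exists_mem_of_ne_nil _ h; exact ⟨p, Or.inl hp⟩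
      · obtain ⟨p, hp⟩ := List.exists_mem_of_ne_nil _ h; exact ⟨p, Or.inr (Or.inl hp)⟩
      · obtain ⟨p, hp⟩ := List.exists_mem_of_ne_nil _ h; exact ⟨p, Or.inr (Or.inr hp)⟩
    obtain ⟨p, hp⟩ := hex
    exact List.ne_nil_of_mem ((hmem_u p).2 hp)
  set Mx := (PySem.List.max? (u.map (fun p => p.1)) (fun v => v)).getD 0 with hMx_def
  set My := (PySem.List.max? (u.map (fun p => p.2)) (fun v => v)).getD 0 with hMy_def
  set mx := (PySem.List.min? (u.map (fun p => p.1)) (fun v => v)).getD 0 with hmx_def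
  set my := (PySem.List.min? (u.map (fun p => p.2)) (fun v => v)).getD 0 with hmy_def
  -- bounds
  have hMap_ne : ∀ f : Int × Int → Int, u.map f ≠ [] := by
    intro f h; exact hu_ne (List.map_eq_nil_iff.1 h)
  have hbMx : ∀ p ∈ u, p.1 ≤ Mx := by
    intro p hp
    cases hm : PySem.List.max? (u.map (fun p => p.1)) (fun v => v) with
    | none => exact absurd ((PySem.List.max?_eq_none_iff _ _).1 hm) (hMap_ne _)
    | some m =>
      have := PySem.List.max?_isMax hm p.1 (List.mem_map_of_mem hp)
      rw [hMx_def, hm]; simpa using this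
  have hbMy : ∀ p ∈ u, p.2 ≤ My := by
    intro p hp
    cases hm : PySem.List.max? (u.map (fun p => p.2)) (fun v => v) with
    | none => exact absurd ((PySem.List.max?_eq_none_iff _ _).1 hm) (hMap_ne _)
    | some m =>
      have := PySem.List.max?_isMax hm p.2 (List.mem_map_of_mem hp)
      rw [hMy_def, hm]; simpa using this
  have hbmx : ∀ p ∈ u, mx ≤ p.1 := by
    intro p hp
    cases hm : PySem.List.min? (u.map (fun p => p.1)) (fun v => v) with
    | none => exact absurd ((PySem.List.min?_eq_none_iff _ _).1 hm) (hMap_ne _)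
    | some m =>
      have := PySem.List.min?_isMin hm p.1 (List.mem_map_of_mem hp)
      rw [hmx_def, hm]; simpa using this
  have hbmy : ∀ p ∈ u, my ≤ p.2 := by
    intro p hp
    cases hm : PySem.List.min? (u.map (fun p => p.2)) (fun v => v) with
    | none => exact absurd ((PySem.List.min?_eq_none_iff _ _).1 hm) (hMap_ne _)
    | some m =>
      have := PySem.List.min?_isMin hm p.2 (List.mem_map_of_mem hp)
      rw [hmy_def, hm]; simpa using this
  set W := (Mx - mx + 1).toNat with hW_def
  set H := (My + 1 - my).toNat with hH_def
  -- point bounds in the fold form, for a grid of length H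
  have hbound : ∀ (L : List (Int × Int)), (∀ p ∈ L, p ∈ u) →
      ∀ p ∈ L, 0 ≤ p.1 - mx ∧ (p.1 - mx).toNat < W ∧ 0 ≤ p.2 - my ∧ (p.2 - my).toNat < H := by
    intro L hL p hp
    have h1 := hbmx p (hL p hp); have h2 := hbMx p (hL p hp)
    have h3 := hbmy p (hL p hp); have h4 := hbMy p (hL p hp)
    refine ⟨by omega, by omega, by omega, by omega⟩
  -- the stamped grid and its shape
  set g0 := List.replicate H (List.replicate W '.') with hg0_def
  set g1 := occupied.foldl (stampPt mx my '#') g0 with hg1_def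
  set g2 := beacons.foldl (stampPt mx my 'B') g1 with hg2_def
  set g3 := sensors.foldl (stampPt mx my 'S') g2 with hg3_def
  have hrow0 : ∀ r ∈ g0, r.length = W := by
    intro r hr; rw [List.eq_of_mem_replicate hr]; simp
  have hrow1 : ∀ r ∈ g1, r.length = W := pvFoldl_rows mx my W '#' occupied g0 hrow0
  have hrow2 : ∀ r ∈ g2, r.length = W := pvFoldl_rows mx my W 'B' beacons g1 hrow1
  have hrow3 : ∀ r ∈ g3, r.length = W := pvFoldl_rows mx my W 'S' sensors g2 hrow2
  have hlen1 : g1.length = H := by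
    rw [hg1_def, pvFoldl_stamp_length, hg0_def, List.length_replicate]
  have hlen2 : g2.length = H := by rw [hg2_def, pvFoldl_stamp_length]; exact hlen1
  have hlen3 : g3.length = H := by rw [hg3_def, pvFoldl_stamp_length]; exact hlen2
  -- cell characterisation of the stamped grid
  have hcell : ∀ i j : Nat, j < W →
      pvCell g3 i j =
        (if (mx + (j : Int), my + (i : Int)) ∈ sensors then 'S'
         else if (mx + (j : Int), my + (i : Int)) ∈ beacons then 'B'
         else if (mx + (j : Int), my + (i : Int)) ∈ occupied then '#'
         else '.') := by
    intro i j hj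
    rw [hg3_def, pvCell_foldl mx my W 'S' sensors g2 hrow2
        (by rw [hlen2]; exact hbound sensors (fun p hp => (hmem_u p).2 (Or.inl hp))) i j hj]
    rw [hg2_def, pvCell_foldl mx my W 'B' beacons g1 hrow1
        (by rw [hlen1]; exact hbound beacons (fun p hp => (hmem_u p).2 (Or.inr (Or.inl hp)))) i j hj]
    rw [hg1_def, pvCell_foldl mx my W '#' occupied g0 hrow0
        (by rw [hg0_def, List.length_replicate]
            exact hbound occupied (fun p hp => (hmem_u p).2 (Or.inr (Or.inr hp)))) i j hj]
    rw [hg0_def, pvCell_replicate]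
  -- now compare the two row lists
  congr 1
  apply List.ext_getElem
  · simp [PySem.List.length_pyRange_one, PySem.List.length_enumerate, hlen3, hH_def]
  · intro i h1 h2
    have hiH : i < H := by
      simpa [PySem.List.length_pyRange_one, hH_def] using h1
    have hig3 : i < g3.length := by omega
    refine Option.some_injective _ ?_
    rw [← List.getElem?_eq_getElem h1, ← List.getElem?_eq_getElem h2,
        List.getElem?_map, List.getElem?_map, pvEnumerate_getElem?,
        List.getElem?_eq_getElem hig3]
    have hyr : (PySem.List.pyRange my (My + 1) 1)[i]? = some (my + (i : Int)) := by
      have hn : i < (List.range (My + 1 - my).toNat).length := by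
        rw [List.length_range]; omega
      rw [PySem.List.pyRange_one, List.getElem?_map, List.getElem?_eq_getElem hn]
      simp [List.getElem_range]
    rw [hyr]
    simp only [Option.map_some, Option.some.injEq]
    congr 2
    rw [pvRow_eq_map g3 W i hrow3 hig3, PySem.List.pyRange_one, List.map_map]
    apply List.ext_getElem
    · simp only [List.length_map, List.length_range]
      omega
    · intro j hj1 hj2
      have hjW : j < W := by simpa using hj2
      simp only [List.getElem_map, List.getElem_range, Function.comp]
      rw [hcell i j hjW]
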